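-- pv_equiv track=rewrite | github.com/rivermont/spidy | spidy/crawler.py | make_file_path
-- ===== SOURCE A (Python) =====
-- def make_file_path(url, ext):
--     """
--     Makes a valid Windows file path for a given url.
--     """
--     url = url.replace(ext, '')  # Remove extension from path
--     for char in """/\\ *""":  # Remove illegal characters from path
--         url = url.replace(char, '-')
--     for char in """|:?&<>""":
--         url = url.replace(char, '')
--     url = url[:255] + ext  # Truncate to valid file length
--     return url
-- ===== SOURCE B (Python) =====
-- def make_file_path(url, ext):
--     """
--     Makes a valid Windows file path for a given url.
--     """
--     url = url.replace(ext, '')  # Remove extension from path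
--     # Single pass over the characters instead of eleven full-string replace scans
--     url = ''.join('-' if c in '/\\ *' else ('' if c in '|:?&<>' else c) for c in url)
--     return url[:255] + ext
-- ===== Notes on version B (the rewrite author's own statement) =====
-- stated objective: simpler
-- what changed: The two replace-loops (ten full-string scans) are replaced by a single character-by-character pass that maps each char to '-', '' or itself; ext removal and truncate-then-append stay as in A.
import Mathlib
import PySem

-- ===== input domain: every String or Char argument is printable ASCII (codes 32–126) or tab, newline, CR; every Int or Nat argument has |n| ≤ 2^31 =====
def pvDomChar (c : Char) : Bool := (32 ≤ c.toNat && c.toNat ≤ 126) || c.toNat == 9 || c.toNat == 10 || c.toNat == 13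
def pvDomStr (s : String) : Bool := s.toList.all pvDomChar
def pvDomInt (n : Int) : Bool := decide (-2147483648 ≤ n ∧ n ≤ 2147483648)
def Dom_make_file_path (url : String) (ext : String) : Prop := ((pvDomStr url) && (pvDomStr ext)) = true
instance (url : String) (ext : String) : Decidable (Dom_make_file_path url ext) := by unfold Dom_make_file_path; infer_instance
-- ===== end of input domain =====

-- B replaces A's two replace-loops (ten full-string scans) by one character-by-character pass; simpler, same result.

-- ===== PORT A =====
def make_file_path (url : String) (ext : String) : String :=
  let u0 := PySem.Chars.replace url.toList ext.toList []
  let u1 := ("/\\ *".toList).foldl (fun s c => PySem.Chars.replace s [c] ['-']) u0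
  let u2 := ("|:?&<>".toList).foldl (fun s c => PySem.Chars.replace s [c] []) u1
  String.ofList (PySem.Chars.slice u2 none (some 255) ++ ext.toList)

-- ===== PORT B =====
-- one character of B's generator expression: '-' if c in '/\\ *' else '' if c in '|:?&<>' else c
def pvMapChar (c : Char) : List Char :=
  if c ∈ ['/', '\\', ' ', '*'] then ['-']
  else if c ∈ ['|', ':', '?', '&', '<', '>'] then []
  else [c]

def make_file_path_alt (url : String) (ext : String) : String :=
  let u0 := PySem.Chars.replace url.toList ext.toList []
  let u1 := u0.flatMap pvMapChar
  String.ofList (PySem.Chars.slice u1 none (some 255) ++ ext.toList)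

-- ===== PRECONDITION & SPEC =====
def Spec_make_file_path (url : String) (ext : String) (out : String) : Prop := out = make_file_path_alt url ext
instance (url : String) (ext : String) (out : String) : Decidable (Spec_make_file_path url ext out) := by unfold Spec_make_file_path; infer_instance

-- ===== CLAIM (what is proved, stated in full; the proofs are below) =====
def Claim_equal_make_file_path : Prop := ∀ (url : String) (ext : String), Dom_make_file_path url ext → Spec_make_file_path url ext (make_file_path url ext)

-- ===== LEMMAS AND PROOFS =====

-- str.replace with a single-character pattern is a per-character flatMap
theorem pv_go_single (c : Char) (new : List Char) :
    ∀ (s : List Char) (fuel : Nat) (acc : List Char), s.length ≤ fuel →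
      PySem.Chars.replace.go [c] new fuel s acc
        = acc.reverse ++ s.flatMap (fun x => if x = c then new else [x]) := by
  intro s
  induction s with
  | nil =>
    intro fuel acc _
    cases fuel <;> simp [PySem.Chars.replace.go]
  | cons x t ih =>
    intro fuel acc hlen
    cases fuel with
    | zero => simp at hlen
    | succ n =>
      simp only [PySem.Chars.replace.go, List.isPrefixOf, List.length_cons, List.drop_succ_cons,
        Bool.and_true, List.flatMap_cons]
      by_cases hx : c = x
      · subst hx
        rw [if_pos (by simp), show List.drop [].length t = t from rfl,
          ih n (new.reverse ++ acc) (by simpa using hlen)]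
        simp
      · rw [if_neg (by simp [beq_iff_eq]; exact hx), ih n (x :: acc) (by simpa using hlen),
          if_neg (fun h => hx h.symm)]
        simp

theorem pv_replace_single (s : List Char) (c : Char) (new : List Char) :
    PySem.Chars.replace s [c] new = s.flatMap (fun x => if x = c then new else [x]) := by
  have h := pv_go_single c new s s.length [] (Nat.le_refl _)
  simpa [PySem.Chars.replace] using h

-- A's ten sequential single-char replaces collapse to B's single pass
theorem pv_chain (u : List Char) :
    ("|:?&<>".toList).foldl (fun s c => PySem.Chars.replace s [c] [])
      (("/\\ *".toList).foldl (fun s c => PySem.Chars.replace s [c] ['-']) u)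
      = u.flatMap pvMapChar := by
  simp only [show ("/\\ *".toList) = ['/', '\\', ' ', '*'] from rfl,
    show ("|:?&<>".toList) = ['|', ':', '?', '&', '<', '>'] from rfl,
    List.foldl_cons, List.foldl_nil, pv_replace_single, List.flatMap_assoc]
  refine List.flatMap_congr (fun x _ => ?_)
  by_cases h1 : x = '/';  · subst h1; rfl
  by_cases h2 : x = '\\'; · subst h2; rfl
  by_cases h3 : x = ' ';  · subst h3; rfl
  by_cases h4 : x = '*';  · subst h4; rfl
  by_cases h5 : x = '|';  · subst h5; rfl
  by_cases h6 : x = ':';  · subst h6; rfl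
  by_cases h7 : x = '?';  · subst h7; rfl
  by_cases h8 : x = '&';  · subst h8; rfl
  by_cases h9 : x = '<';  · subst h9; rfl
  by_cases h10 : x = '>'; · subst h10; rfl
  simp [pvMapChar, h1, h2, h3, h4, h5, h6, h7, h8, h9, h10]

-- ===== VERDICT (by name: the statement is the Claim_ definition above) =====
theorem make_file_path_spec : Claim_equal_make_file_path := by
  intro url ext _
  simp only [Spec_make_file_path, make_file_path, make_file_path_alt, pv_chain]
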